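-- pv_equiv track=rewrite | github.com/lionsola/words | words.py | find_words_list
-- ===== SOURCE A (Python) =====
-- def find_words_list(roll, word_list):
--     words = []
--     len_dist = [0, 0, 0, 0, 0, 0]
--     for word in word_list:
--         if len(word) > 1 and check(roll, word):
--             words.append(word)
--             len_dist[len(word)-2] += 1
--     return words, len_dist
--
-- def make_faces(roll):
--     faces = {}
--     for l in roll:
--         faces[l] = faces.get(l, 0) + 1
--     return faces
--
-- def check(roll, word):
--     faces = make_faces(roll)
--     for l in word:
--         if l not in faces or faces[l] == 0:
--             return False
--         else:
--             faces[l] -= 1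
--     return True
-- ===== SOURCE B (Python) =====
-- def find_words_list(roll, word_list):
--     roll_count = {}
--     for c in roll:
--         roll_count[c] = roll_count.get(c, 0) + 1
--     words = []
--     for w in word_list:
--         if len(w) > 1:
--             wc = {}
--             for c in w:
--                 wc[c] = wc.get(c, 0) + 1
--             if all(n <= roll_count.get(c, 0) for c, n in wc.items()):
--                 words.append(w)
--     len_dist = [0, 0, 0, 0, 0, 0]
--     for w in words:
--         len_dist[len(w) - 2] += 1
--     return words, len_dist
-- ===== Notes on version B (the rewrite author's own statement) =====
-- stated objective: faster
-- what changed: B builds the roll letter-counter once and tests each word by whole-multiset comparison of its own counter against it (no per-word rebuild of the roll dict and no greedy decrement), then computes the length histogram in a separate pass over the kept words.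
import Mathlib
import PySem

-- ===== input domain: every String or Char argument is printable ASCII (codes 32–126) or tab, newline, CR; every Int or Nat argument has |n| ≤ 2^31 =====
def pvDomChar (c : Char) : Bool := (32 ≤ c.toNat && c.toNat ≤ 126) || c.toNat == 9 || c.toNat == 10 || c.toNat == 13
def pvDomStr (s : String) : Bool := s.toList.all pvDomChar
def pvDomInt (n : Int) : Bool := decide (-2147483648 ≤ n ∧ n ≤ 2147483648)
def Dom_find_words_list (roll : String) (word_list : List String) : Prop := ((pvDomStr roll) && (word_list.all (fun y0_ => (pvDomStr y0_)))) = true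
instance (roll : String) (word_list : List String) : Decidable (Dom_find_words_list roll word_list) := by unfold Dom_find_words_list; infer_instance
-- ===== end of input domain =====

-- B builds the roll counter once and compares whole letter-counters instead of A's per-word
-- greedy decrement over a rebuilt dict; the length histogram is filled in a second pass. (faster)


-- ===== PORT A =====
-- faces = {}; for l in roll: faces[l] = faces.get(l, 0) + 1
def make_faces (roll : String) : PySem.Dict Char Int :=
  roll.toList.foldl (fun faces l => faces.insert l (faces.getD l 0 + 1)) PySem.Dict.empty

-- for l in word: if l not in faces or faces[l] == 0: return False; else: faces[l] -= 1
def checkLoop (faces : PySem.Dict Char Int) : List Char → Bool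
  | [] => true
  | l :: rest =>
    if !faces.contains l || faces.getD l 0 == 0 then false
    else checkLoop (faces.insert l (faces.getD l 0 - 1)) rest

def check (roll : String) (word : String) : Bool :=
  checkLoop (make_faces roll) word.toList

-- len_dist[i] += 1 — exact while the index is in range (Pre_ excludes the IndexError inputs)
def pyIncrAt (xs : List Int) (i : Int) : List Int :=
  PySem.List.pySetD xs i (PySem.List.pyGetD xs i 0 + 1)

def find_words_list (roll : String) (word_list : List String) : List String × List Int :=
  word_list.foldl
    (fun (st : List String × List Int) word =>
      if word.toList.length > 1 && check roll word then
        (st.1 ++ [word], pyIncrAt st.2 ((word.toList.length : Int) - 2))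
      else st)
    ([], [0, 0, 0, 0, 0, 0])

-- ===== PORT B =====
-- d = {}; for c in s: d[c] = d.get(c, 0) + 1
def countChars (s : String) : PySem.Dict Char Int :=
  s.toList.foldl (fun d c => d.insert c (d.getD c 0 + 1)) PySem.Dict.empty

-- all(n <= roll_count.get(c, 0) for c, n in wc.items())
def buildable (roll_count : PySem.Dict Char Int) (w : String) : Bool :=
  (countChars w).items.all (fun p => p.2 ≤ roll_count.getD p.1 0)

def find_words_list_alt (roll : String) (word_list : List String) : List String × List Int :=
  let roll_count := countChars roll
  let words := word_list.filter (fun w => w.toList.length > 1 && buildable roll_count w)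
  let len_dist := words.foldl (fun d w => pyIncrAt d ((w.toList.length : Int) - 2)) [0, 0, 0, 0, 0, 0]
  (words, len_dist)

-- ===== PRECONDITION & SPEC =====
-- Pre_ excludes exactly the inputs where the Python raises IndexError: a word of length ≥ 8 that
-- is buildable from the roll reaches len_dist[len(word)-2] with an index past the 6-slot list.
def Pre_find_words_list (roll : String) (word_list : List String) : Prop :=
  ∀ w ∈ word_list, w.toList.length ≤ 7 ∨
    ∃ c ∈ w.toList, (roll.toList.count c : Int) < (w.toList.count c : Int)
instance (roll : String) (word_list : List String) : Decidable (Pre_find_words_list roll word_list) := by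
  unfold Pre_find_words_list; infer_instance

def pvWitness_find_words_list : String × List String := ("aetx", ["tea", "at", "z", "taxeaa"])

def Spec_find_words_list (roll : String) (word_list : List String) (out : List String × List Int) : Prop := out = find_words_list_alt roll word_list
instance (roll : String) (word_list : List String) (out : List String × List Int) : Decidable (Spec_find_words_list roll word_list out) := by unfold Spec_find_words_list; infer_instance

-- ===== CLAIM (what is proved, stated in full; the proofs are below) =====
def Claim_equal_find_words_list : Prop := ∀ (roll : String) (word_list : List String), Dom_find_words_list roll word_list → Pre_find_words_list roll word_list → Spec_find_words_list roll word_list (find_words_list roll word_list)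

-- ===== LEMMAS AND PROOFS =====

-- A's greedy decrement loop succeeds iff every letter's demand is at most its supply in `faces`.
theorem checkLoop_iff (ls : List Char) (faces : PySem.Dict Char Int)
    (hnn : ∀ c, 0 ≤ faces.getD c 0) :
    checkLoop faces ls = true ↔ ∀ c ∈ ls, (ls.count c : Int) ≤ faces.getD c 0 := by
  induction ls generalizing faces with
  | nil => simp [checkLoop]
  | cons l rest ih =>
    by_cases hc : faces.contains l = true
    · by_cases hz : faces.getD l 0 = 0
      · simp only [checkLoop, hz]
        constructor
        · intro h; simp at h
        · intro h
          have h1 := h l (by simp)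
          have hcnt : List.count l (l :: rest) = List.count l rest + 1 := by
            simp
          rw [hz, hcnt] at h1
          have : (0 : Int) ≤ List.count l rest := by positivity
          push_cast at h1
          omega
      · have hpos : 1 ≤ faces.getD l 0 := by have := hnn l; omega
        have hstep : checkLoop faces (l :: rest)
            = checkLoop (faces.insert l (faces.getD l 0 - 1)) rest := by
          simp [checkLoop, hc, hz]
        set v := faces.getD l 0 with hv
        have hnn' : ∀ c, 0 ≤ (faces.insert l (v - 1)).getD c 0 := by
          intro c
          rw [PySem.Dict.getD_insert]
          split_ifs with h
          · omega
          · exact hnn c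
        rw [hstep, ih _ hnn']
        have hcount_self : List.count l (l :: rest) = List.count l rest + 1 := by
          simp
        have hcount_ne : ∀ c, c ≠ l → List.count c (l :: rest) = List.count c rest := by
          intro c hcl
          simp [Ne.symm hcl]
        constructor
        · intro h c hcmem
          rcases List.mem_cons.mp hcmem with rfl | hcr
          · by_cases hlr : c ∈ rest
            · have h2 := h c hlr
              rw [PySem.Dict.getD_insert, if_pos rfl] at h2
              rw [hcount_self]
              push_cast
              omega
            · have h0 : rest.count c = 0 := List.count_eq_zero.mpr hlr
              rw [hcount_self, h0]
              push_cast
              omega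
          · by_cases hcl : c = l
            · subst hcl
              have h2 := h c hcr
              rw [PySem.Dict.getD_insert, if_pos rfl] at h2
              rw [hcount_self]
              push_cast
              omega
            · have h2 := h c hcr
              rw [PySem.Dict.getD_insert, if_neg hcl] at h2
              rw [hcount_ne c hcl]
              exact h2
        · intro h c hcr
          rw [PySem.Dict.getD_insert]
          by_cases hcl : c = l
          · subst hcl
            have h2 := h c (by simp)
            rw [if_pos rfl]
            rw [hcount_self] at h2
            push_cast at h2
            omega
          · rw [if_neg hcl, ← hcount_ne c hcl]
            exact h c (List.mem_cons_of_mem _ hcr)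
    · simp only [checkLoop, Bool.not_eq_true] at hc ⊢
      rw [hc]
      simp only [Bool.not_false, Bool.true_or, if_true]
      constructor
      · intro h; simp at h
      · intro h
        have hd : faces.getD l 0 = 0 := PySem.Dict.getD_of_not_contains faces 0 hc
        have h1 := h l (by simp)
        rw [hd] at h1
        have hcnt : List.count l (l :: rest) = List.count l rest + 1 := by
          simp
        rw [hcnt] at h1
        have : (0 : Int) ≤ List.count l rest := by positivity
        push_cast at h1
        omega

theorem make_faces_eq (roll : String) : make_faces roll = PySem.Dict.counter roll.toList :=
  PySem.Dict.foldl_insert_getD_add_one_eq_counter roll.toList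

theorem countChars_eq (s : String) : countChars s = PySem.Dict.counter s.toList :=
  PySem.Dict.foldl_insert_getD_add_one_eq_counter s.toList

-- the common mathematical condition
theorem check_iff (roll w : String) :
    check roll w = true ↔ ∀ c ∈ w.toList, (w.toList.count c : Int) ≤ (roll.toList.count c : Int) := by
  unfold check
  rw [make_faces_eq]
  rw [checkLoop_iff _ _ (by intro c; rw [PySem.Dict.getD_counter]; positivity)]
  simp [PySem.Dict.getD_counter]

theorem buildable_iff (roll w : String) :
    buildable (countChars roll) w = true ↔ ∀ c ∈ w.toList, (w.toList.count c : Int) ≤ (roll.toList.count c : Int) := by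
  unfold buildable
  rw [countChars_eq, countChars_eq, PySem.Dict.items_counter]
  simp only [List.all_map, List.all_eq_true]
  constructor
  · intro h c hc
    have := h c ((PySem.Set.mem_ofList _ _).mpr hc)
    simpa [PySem.Dict.getD_counter] using this
  · intro h c hc
    have := h c ((PySem.Set.mem_ofList _ _).mp hc)
    simpa [PySem.Dict.getD_counter] using this

theorem check_eq_buildable (roll w : String) :
    check roll w = buildable (countChars roll) w := by
  rw [Bool.eq_iff_iff, check_iff, buildable_iff]

-- A's single fused loop equals B's filter followed by the histogram pass.
theorem foldl_split (p : String → Bool) (f : List Int → String → List Int)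
    (wl : List String) (ws : List String) (d : List Int) :
    wl.foldl
      (fun (st : List String × List Int) word =>
        if p word then (st.1 ++ [word], f st.2 word) else st)
      (ws, d)
    = (ws ++ wl.filter p, (wl.filter p).foldl f d) := by
  induction wl generalizing ws d with
  | nil => simp
  | cons w rest ih =>
    by_cases hp : p w = true
    · simp only [List.foldl_cons, List.filter_cons, hp, if_pos]
      rw [ih]
      simp
    · simp only [List.foldl_cons, List.filter_cons, hp, Bool.false_eq_true, if_false]
      rw [ih]

-- ===== VERDICT (by name: the statement is the Claim_ definition above) =====
theorem find_words_list_spec : Claim_equal_find_words_list := by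
  intro roll word_list _ _
  unfold Spec_find_words_list find_words_list find_words_list_alt
  rw [foldl_split (fun w => decide (w.toList.length > 1) && check roll w)
        (fun d w => pyIncrAt d ((w.toList.length : Int) - 2)) word_list [] [0,0,0,0,0,0]]
  have hf : word_list.filter (fun w => decide (w.toList.length > 1) && check roll w)
      = word_list.filter (fun w => decide (w.toList.length > 1) && buildable (countChars roll) w) :=
    List.filter_congr (fun w _ => by rw [check_eq_buildable])
  rw [List.nil_append, hf]
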